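-- pv_equiv track=rewrite | github.com/loki2046-mao/wechat-layout-editor | engine/feishu_to_copy_page.py | _gallery_rows
-- ===== SOURCE A (Python) =====
-- def _gallery_rows(n: int) -> list[int]:
--   """
--   根据图片数量返回每行的图片数量列表。
--   规则:
--     1 → [1](保持 single image,不走这里)
--     2 → [2]
--     3 → [3]
--     4 → [2, 2]
--     5 → [3, 2]
--     6 → [3, 3]
--     7 → [3, 2, 2]
--     8 → [2, 2, 2, 2]
--     通用:每行最多 3 张,按 3/3/3... 排,最后一行剩余居中
--   """
--   special: dict[int, list[int]] = {
--     2: [2],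
--     3: [3],
--     4: [2, 2],
--     5: [3, 2],
--     6: [3, 3],
--     7: [3, 2, 2],
--     8: [2, 2, 2, 2],
--   }
--   if n in special:
--     return special[n]
--   rows: list[int] = []
--   remaining = n
--   while remaining > 0:
--     rows.append(min(3, remaining))
--     remaining -= 3
--   return rows
-- ===== SOURCE B (Python) =====
-- def _gallery_rows(n: int) -> list[int]:
--   if 2 <= n <= 8:
--     return [[2], [3], [2, 2], [3, 2], [3, 3], [3, 2, 2], [2, 2, 2, 2]][n - 2]
--   if n <= 0:
--     return []
--   q, r = divmod(n, 3)
--   return [3] * q + ([r] if r else [])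
-- ===== Notes on version B (the rewrite author's own statement) =====
-- stated objective: simpler
-- what changed: The special-case dict with membership test is replaced by a list indexed with n-2 under a range check, and the while-loop of the general branch is replaced by the closed form divmod(n, 3) giving [3]*q plus the remainder row, with a non-positive guard.
import Mathlib
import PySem

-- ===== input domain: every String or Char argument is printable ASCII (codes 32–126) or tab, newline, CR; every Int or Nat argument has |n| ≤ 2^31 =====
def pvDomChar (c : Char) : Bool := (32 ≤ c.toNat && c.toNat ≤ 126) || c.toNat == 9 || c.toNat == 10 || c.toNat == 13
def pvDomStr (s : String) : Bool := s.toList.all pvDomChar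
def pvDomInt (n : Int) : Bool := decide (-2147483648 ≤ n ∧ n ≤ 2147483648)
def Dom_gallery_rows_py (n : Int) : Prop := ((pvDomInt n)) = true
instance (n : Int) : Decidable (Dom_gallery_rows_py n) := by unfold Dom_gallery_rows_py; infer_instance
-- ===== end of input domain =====

-- B replaces A's special-case dict by an index-lookup table and A's while-loop by the closed form divmod(n, 3): simpler.

-- ===== PORT A =====
def gallerySpecialA : PySem.Dict Int (List Int) :=
  PySem.Dict.ofList [(2, [2]), (3, [3]), (4, [2, 2]), (5, [3, 2]), (6, [3, 3]), (7, [3, 2, 2]), (8, [2, 2, 2, 2])]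

-- the while-loop of A: rows.append(min(3, remaining)); remaining -= 3
def galleryLoopA (remaining : Int) : List Int :=
  if remaining > 0 then min 3 remaining :: galleryLoopA (remaining - 3) else []
termination_by remaining.toNat
decreasing_by omega

def gallery_rows_py (n : Int) : List Int :=
  match gallerySpecialA.get? n with
  | some v => v
  | none => galleryLoopA n

-- ===== PORT B =====
-- the literal row table of Source B, indexed by n-2
def galleryTableB : List (List Int) := [[2], [3], [2, 2], [3, 2], [3, 3], [3, 2, 2], [2, 2, 2, 2]]

def gallery_rows_py_alt (n : Int) : List Int :=
  if 2 ≤ n ∧ n ≤ 8 then (PySem.List.pyGet? galleryTableB (n - 2)).getD []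
  else if n ≤ 0 then []
  else
    let q := PySem.Int.floordiv n 3
    let r := PySem.Int.mod n 3
    List.replicate q.toNat 3 ++ (if r = 0 then [] else [r])

-- ===== PRECONDITION & SPEC =====
def Spec_gallery_rows_py (n : Int) (out : List Int) : Prop := out = gallery_rows_py_alt n
instance (n : Int) (out : List Int) : Decidable (Spec_gallery_rows_py n out) := by unfold Spec_gallery_rows_py; infer_instance

-- ===== CLAIM (what is proved, stated in full; the proofs are below) =====
def Claim_equal_gallery_rows_py : Prop := ∀ (n : Int), Dom_gallery_rows_py n → Spec_gallery_rows_py n (gallery_rows_py n)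

-- ===== LEMMAS AND PROOFS =====

-- A's loop computes exactly B's closed form, for every integer input.
theorem galleryLoopA_eq (m : Int) :
    galleryLoopA m =
      if m ≤ 0 then []
      else List.replicate (PySem.Int.floordiv m 3).toNat 3 ++
        (if PySem.Int.mod m 3 = 0 then [] else [PySem.Int.mod m 3]) := by
  rw [galleryLoopA]
  by_cases h : m > 0
  · rw [if_pos h, if_neg (by omega)]
    rw [PySem.Int.floordiv_eq_ediv_of_pos (by norm_num), PySem.Int.mod_eq_emod_of_pos (by norm_num)]
    by_cases h3 : m ≤ 3
    · have hz : galleryLoopA (m - 3) = [] := by rw [galleryLoopA]; simp; omega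
      rw [hz]
      interval_cases m <;> decide
    · have ih := galleryLoopA_eq (m - 3)
      rw [if_neg (by omega)] at ih
      rw [PySem.Int.floordiv_eq_ediv_of_pos (by norm_num), PySem.Int.mod_eq_emod_of_pos (by norm_num)] at ih
      rw [ih]
      have hmin : min (3 : Int) m = 3 := by omega
      have hqn : (m / 3).toNat = ((m - 3) / 3).toNat + 1 := by
        have : 0 ≤ (m - 3) / 3 := Int.ediv_nonneg (by omega) (by norm_num)
        omega
      have hr : m % 3 = (m - 3) % 3 := by omega
      rw [hqn, hr, List.replicate_succ]
      simp
      omega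
  · rw [if_neg h, if_pos (by omega)]
termination_by m.toNat
decreasing_by omega

-- outside 2..8 the special dict finds nothing
theorem gallerySpecialA_none (n : Int) (h : ¬ (2 ≤ n ∧ n ≤ 8)) : gallerySpecialA.get? n = none := by
  simp only [gallerySpecialA]
  simp only [PySem.Dict.ofList, PySem.Dict.update, List.foldl]
  simp only [PySem.Dict.get?_insert, PySem.Dict.get?_empty]
  split_ifs <;> first | rfl | omega

-- ===== VERDICT (by name: the statement is the Claim_ definition above) =====
theorem gallery_rows_py_spec : Claim_equal_gallery_rows_py := by
  intro n _
  unfold Spec_gallery_rows_py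
  by_cases h : 2 ≤ n ∧ n ≤ 8
  · obtain ⟨h1, h2⟩ := h
    interval_cases n <;> decide
  · unfold gallery_rows_py gallery_rows_py_alt
    rw [gallerySpecialA_none n h, if_neg h]
    exact galleryLoopA_eq n
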